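-- pv_equiv track=rewrite | github.com/chrisarseno/nexus | src/nexus/rag/context_window_manager.py | _remove_redundant_whitespace
-- ===== SOURCE A (Python) =====
-- from typing import Dict, Any, List, Optional, Tuple, Iterator, Set, Callable
--
-- def _remove_redundant_whitespace(text: str) -> Tuple[str, Dict[int, int]]:
--     """
--     Remove redundant whitespace while tracking positions for reconstruction.
--     Returns (compressed_text, position_mapping).
--     """
--     result = []
--     position_map = {}
--     original_pos = 0
--     new_pos = 0
--     prev_was_space = False
--
--     for char in text:
--         if char in ' \t':
--             if not prev_was_space:
--                 result.append(' ')
--                 position_map[new_pos] = original_pos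
--                 new_pos += 1
--             prev_was_space = True
--         elif char == '\n':
--             result.append('\n')
--             position_map[new_pos] = original_pos
--             new_pos += 1
--             prev_was_space = True
--         else:
--             result.append(char)
--             position_map[new_pos] = original_pos
--             new_pos += 1
--             prev_was_space = False
--
--         original_pos += 1
--
--     return ''.join(result), position_map
-- ===== SOURCE B (Python) =====
-- def _remove_redundant_whitespace(text):
--     """Run-level rewrite: scan maximal space/tab runs and skip them in one jump,
--     deciding emission from the character before the run instead of a carried flag."""
--     out = []
--     pmap = {}
--     n = len(text)
--     i = 0
--     while i < n:
--         if text[i] in ' \t':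
--             if i == 0 or text[i - 1] != '\n':
--                 pmap[len(out)] = i
--                 out.append(' ')
--             i += 1
--             while i < n and text[i] in ' \t':
--                 i += 1
--         else:
--             pmap[len(out)] = i
--             out.append(text[i])
--             i += 1
--     return ''.join(out), pmap
-- ===== Notes on version B (the rewrite author's own statement) =====
-- stated objective: alternative
-- what changed: Replaces A's per-character scan with a carried prev_was_space flag by a stateless run-level scan that jumps over each maximal space/tab run in one inner skip loop and decides emission by looking at the character before the run.
import Mathlib
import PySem

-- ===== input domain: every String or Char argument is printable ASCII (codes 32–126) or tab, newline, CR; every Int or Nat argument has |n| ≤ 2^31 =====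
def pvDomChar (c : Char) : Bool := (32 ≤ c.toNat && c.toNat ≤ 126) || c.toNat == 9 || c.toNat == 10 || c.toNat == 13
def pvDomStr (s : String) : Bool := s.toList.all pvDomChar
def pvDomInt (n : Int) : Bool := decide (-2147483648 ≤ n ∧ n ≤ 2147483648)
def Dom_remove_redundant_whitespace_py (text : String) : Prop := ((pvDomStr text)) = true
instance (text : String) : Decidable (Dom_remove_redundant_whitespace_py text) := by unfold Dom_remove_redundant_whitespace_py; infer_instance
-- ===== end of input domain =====

-- B replaces A's per-character loop with a prev_was_space flag by a stateless run-level
-- scan (skip each maximal space/tab run, decide emission from the char before the run).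

-- ===== PORT A =====
-- loop body of A's `for char in text`, extracted as a named step function
-- state = (result, position_map, original_pos, new_pos, prev_was_space)
def stepA (st : List Char × List (Int × Int) × Int × Int × Bool) (char : Char) :
    List Char × List (Int × Int) × Int × Int × Bool :=
  let (result, position_map, original_pos, new_pos, prev_was_space) := st
  if char = ' ' ∨ char = '\t' then
    if !prev_was_space then
      (result ++ [' '], position_map ++ [(new_pos, original_pos)], original_pos + 1, new_pos + 1, true)
    else
      (result, position_map, original_pos + 1, new_pos, true)
  else if char = '\n' then
    (result ++ ['\n'], position_map ++ [(new_pos, original_pos)], original_pos + 1, new_pos + 1, true)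
  else
    (result ++ [char], position_map ++ [(new_pos, original_pos)], original_pos + 1, new_pos + 1, false)

def remove_redundant_whitespace_py (text : String) : String × (List (Int × Int)) :=
  let st := text.toList.foldl stepA ([], [], 0, 0, false)
  (String.mk st.1, st.2.1)

-- ===== PORT B =====
-- inner `while i < n and text[i] in ' \t': i += 1` skip loop of B
def altSkip (s : List Char) (i : Nat) : Nat :=
  if h : i < s.length then
    if s[i]! = ' ' ∨ s[i]! = '\t' then altSkip s (i + 1) else i
  else i
termination_by s.length - i

-- needed by altLoop's termination proof (cited in its decreasing_by)
theorem altSkip_ge (s : List Char) (i : Nat) : i ≤ altSkip s i := by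
  fun_induction altSkip s i with
  | case1 i h hs ih => omega
  | case2 => omega
  | case3 => omega

-- outer `while i < n` loop of B, carrying out / pmap
def altLoop (s : List Char) (i : Nat) (out : List Char) (pmap : List (Int × Int)) :
    List Char × List (Int × Int) :=
  if h : i < s.length then
    if s[i]! = ' ' ∨ s[i]! = '\t' then
      if i = 0 ∨ ¬ s[i - 1]! = '\n' then
        altLoop s (altSkip s (i + 1)) (out ++ [' ']) (pmap ++ [((out.length : Int), (i : Int))])
      else
        altLoop s (altSkip s (i + 1)) out pmap
    else
      altLoop s (i + 1) (out ++ [s[i]!]) (pmap ++ [((out.length : Int), (i : Int))])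
  else (out, pmap)
termination_by s.length - i
decreasing_by
  · have := altSkip_ge s (i + 1); omega
  · have := altSkip_ge s (i + 1); omega
  · omega

def remove_redundant_whitespace_py_alt (text : String) : String × (List (Int × Int)) :=
  let st := altLoop text.toList 0 [] []
  (String.mk st.1, st.2)

-- ===== PRECONDITION & SPEC =====
def Spec_remove_redundant_whitespace_py (text : String) (out : String × (List (Int × Int))) : Prop := out = remove_redundant_whitespace_py_alt text
instance (text : String) (out : String × (List (Int × Int))) : Decidable (Spec_remove_redundant_whitespace_py text out) := by unfold Spec_remove_redundant_whitespace_py; infer_instance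

-- ===== CLAIM (what is proved, stated in full; the proofs are below) =====
def Claim_equal_remove_redundant_whitespace_py : Prop := ∀ (text : String), Dom_remove_redundant_whitespace_py text → Spec_remove_redundant_whitespace_py text (remove_redundant_whitespace_py text)

-- ===== LEMMAS AND PROOFS =====

theorem altSkip_le (s : List Char) (i : Nat) (h : i ≤ s.length) : altSkip s i ≤ s.length := by
  fun_induction altSkip s i with
  | case1 i h hs ih => exact ih (by omega)
  | case2 i h hs => omega
  | case3 i h => omega

theorem altSkip_run (s : List Char) (i : Nat) :
    ∀ k, i ≤ k → k < altSkip s i → (s[k]! = ' ' ∨ s[k]! = '\t') := by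
  fun_induction altSkip s i with
  | case1 i h hs ih =>
    intro k hk1 hk2
    rcases Nat.eq_or_lt_of_le hk1 with rfl | hlt
    · exact hs
    · exact ih k hlt hk2
  | case2 i h hs => intro k hk1 hk2; omega
  | case3 i h => intro k hk1 hk2; omega

theorem altSkip_post (s : List Char) (i : Nat) (h : altSkip s i < s.length) :
    ¬ (s[altSkip s i]! = ' ' ∨ s[altSkip s i]! = '\t') := by
  fun_induction altSkip s i with
  | case1 i h' hs ih => exact ih h
  | case2 i h' hs => exact hs
  | case3 i h' => exact absurd h h'

-- folding A's step over an all-space/tab run with prev_was_space = true only advances original_pos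
theorem runLemma (l : List Char) : ∀ (res : List Char) (pmap : List (Int × Int)) (opos npos : Int),
    (∀ c ∈ l, c = ' ' ∨ c = '\t') →
    List.foldl stepA (res, pmap, opos, npos, true) l = (res, pmap, opos + l.length, npos, true) := by
  induction l with
  | nil => intro res pmap opos npos _; simp
  | cons c t ih =>
    intro res pmap opos npos hall
    have hc : c = ' ' ∨ c = '\t' := hall c (by simp)
    have : stepA (res, pmap, opos, npos, true) c = (res, pmap, opos + 1, npos, true) := by
      simp [stepA, hc]
    rw [List.foldl_cons, this, ih res pmap (opos + 1) npos (fun d hd => hall d (by simp [hd]))]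
    exact congrArg (fun x => (res, pmap, x, npos, true)) (by push_cast [List.length_cons]; omega)

-- A's prev_was_space flag, expressed from the text and position alone
def prevF (s : List Char) (i : Nat) : Bool :=
  decide (i ≠ 0 ∧ (s[i - 1]! = ' ' ∨ s[i - 1]! = '\t' ∨ s[i - 1]! = '\n'))

theorem mainLemma (s : List Char) : ∀ (fuel i : Nat) (res : List Char) (pmap : List (Int × Int)),
    s.length - i ≤ fuel →
    (i < s.length → (s[i]! = ' ' ∨ s[i]! = '\t') → (i = 0 ∨ ¬ (s[i - 1]! = ' ' ∨ s[i - 1]! = '\t'))) →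
    (let st := List.foldl stepA (res, pmap, (i : Int), (res.length : Int), prevF s i) (s.drop i)
     (st.1, st.2.1)) = altLoop s i res pmap := by
  intro fuel
  induction fuel with
  | zero =>
    intro i res pmap hf hb
    have hi : s.length ≤ i := by omega
    rw [List.drop_eq_nil_of_le hi, altLoop]
    simp [Nat.not_lt_of_le hi]
  | succ fuel ih =>
    intro i res pmap hf hb
    by_cases hi : i < s.length
    · have hget : s[i]! = s[i] := getElem!_pos s i hi
      have hdrop : s.drop i = s[i] :: s.drop (i + 1) := List.drop_eq_getElem_cons hi
      rw [hget] at hb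
      by_cases hc : s[i] = ' ' ∨ s[i] = '\t'
      · -- maximal space/tab run: A walks it char by char, B jumps over it
        obtain ⟨j, hjdef⟩ : ∃ j, j = altSkip s (i + 1) := ⟨_, rfl⟩
        have hj1 : i + 1 ≤ j := hjdef ▸ altSkip_ge s (i + 1)
        have hj2 : j ≤ s.length := hjdef ▸ altSkip_le s (i + 1) (by omega)
        have hrun : ∀ k, i + 1 ≤ k → k < j → (s[k]! = ' ' ∨ s[k]! = '\t') :=
          hjdef ▸ altSkip_run s (i + 1)
        have hsplit : s.drop (i + 1) = (s.drop (i + 1)).take (j - (i + 1)) ++ s.drop j := by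
          conv_lhs => rw [← List.take_append_drop (j - (i + 1)) (s.drop (i + 1))]
          rw [List.drop_drop]
          have hjj : i + 1 + (j - (i + 1)) = j := by omega
          rw [hjj]
        have hrlen : ((s.drop (i + 1)).take (j - (i + 1))).length = j - (i + 1) := by
          simp
          omega
        have hrall : ∀ c ∈ (s.drop (i + 1)).take (j - (i + 1)), c = ' ' ∨ c = '\t' := by
          intro c hcmem
          rw [List.mem_iff_getElem] at hcmem
          obtain ⟨k, hk, hck⟩ := hcmem
          rw [hrlen] at hk
          have hkk : (i + 1) + k < s.length := by omega
          have hck2 : c = s[(i + 1) + k]! := by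
            rw [← hck, List.getElem_take, List.getElem_drop]
            exact (getElem!_pos s ((i + 1) + k) hkk).symm
          rw [hck2]
          exact hrun ((i + 1) + k) (by omega) (by omega)
        have hprevj : prevF s j = true := by
          have hjm : s[j - 1]! = ' ' ∨ s[j - 1]! = '\t' := by
            rcases Nat.eq_or_lt_of_le hj1 with heq | hlt
            · rw [← heq]
              simpa [hget] using hc
            · exact hrun (j - 1) (by omega) (by omega)
          unfold prevF
          rw [decide_eq_true_eq]
          refine ⟨by omega, ?_⟩
          rcases hjm with h | h
          · exact Or.inl h
          · exact Or.inr (Or.inl h)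
        have hbj : j < s.length → (s[j]! = ' ' ∨ s[j]! = '\t') →
            (j = 0 ∨ ¬ (s[j - 1]! = ' ' ∨ s[j - 1]! = '\t')) := by
          intro hjl hjs
          exact absurd hjs (hjdef ▸ altSkip_post s (i + 1) (hjdef ▸ hjl))
        have hjc : ((j : Nat) : Int) = (i : Int) + 1 + ((j - (i + 1) : Nat) : Int) := by
          push_cast
          omega
        by_cases hp : i = 0 ∨ ¬ s[i - 1]! = '\n'
        · -- the run is emitted as one ' '
          have hpf : prevF s i = false := by
            have hnot : ¬ (i ≠ 0 ∧ (s[i - 1]! = ' ' ∨ s[i - 1]! = '\t' ∨ s[i - 1]! = '\n')) := by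
              rintro ⟨hne, hd⟩
              rcases hp with h0 | hn
              · exact hne h0
              · rcases hb hi hc with h0 | hns
                · exact hne h0
                · rcases hd with h | h | h
                  · exact hns (Or.inl h)
                  · exact hns (Or.inr h)
                  · exact hn h
            unfold prevF
            rw [decide_eq_false_iff_not]
            exact hnot
          have IH := ih j (res ++ [' ']) (pmap ++ [((res.length : Int), (i : Int))]) (by omega) hbj
          have e2 : (res.length : Int) + 1 = ((res ++ [' ']).length : Int) := by simp
          rw [hprevj, hjc, ← e2] at IH
          rw [altLoop, dif_pos hi, if_pos (by rw [hget]; exact hc), if_pos hp, ← hjdef, ← IH]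
          rw [hdrop, List.foldl_cons]
          have hstep : stepA (res, pmap, (i : Int), (res.length : Int), prevF s i) s[i]
              = (res ++ [' '], pmap ++ [((res.length : Int), (i : Int))], (i : Int) + 1,
                 (res.length : Int) + 1, true) := by
            simp [stepA, hc, hpf]
          rw [hstep, hsplit, List.foldl_append, runLemma _ _ _ _ _ hrall, hrlen]
        · -- the run follows a newline and is suppressed
          have hp2 : i ≠ 0 ∧ s[i - 1]! = '\n' := by
            push_neg at hp
            exact hp
          have hpt : prevF s i = true := by
            unfold prevF
            rw [decide_eq_true_eq]
            exact ⟨hp2.1, Or.inr (Or.inr hp2.2)⟩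
          have IH := ih j res pmap (by omega) hbj
          rw [hprevj, hjc] at IH
          rw [altLoop, dif_pos hi, if_pos (by rw [hget]; exact hc), if_neg hp, ← hjdef, ← IH]
          rw [hdrop, List.foldl_cons]
          have hstep : stepA (res, pmap, (i : Int), (res.length : Int), prevF s i) s[i]
              = (res, pmap, (i : Int) + 1, (res.length : Int), true) := by
            simp [stepA, hc, hpt]
          rw [hstep, hsplit, List.foldl_append, runLemma _ _ _ _ _ hrall, hrlen]
      · -- newline or ordinary character: both emit it and advance one position
        have h1 : ¬ s[i] = ' ' := fun h => hc (Or.inl h)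
        have h2 : ¬ s[i] = '\t' := fun h => hc (Or.inr h)
        have hbn : i + 1 < s.length → (s[i + 1]! = ' ' ∨ s[i + 1]! = '\t') →
            (i + 1 = 0 ∨ ¬ (s[i + 1 - 1]! = ' ' ∨ s[i + 1 - 1]! = '\t')) := by
          intro _ _
          right
          simp only [Nat.add_sub_cancel]
          rw [hget]
          exact hc
        have IH := ih (i + 1) (res ++ [s[i]]) (pmap ++ [((res.length : Int), (i : Int))])
          (by omega) hbn
        have hprevn : prevF s (i + 1) = decide (s[i] = '\n') := by
          unfold prevF
          rw [Nat.add_sub_cancel, hget, decide_eq_decide]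
          constructor
          · rintro ⟨-, h | h | h⟩
            · exact absurd h h1
            · exact absurd h h2
            · exact h
          · intro h
            exact ⟨by omega, Or.inr (Or.inr h)⟩
        have e1 : (i : Int) + 1 = (((i + 1 : Nat)) : Int) := by push_cast; ring
        have e2 : (res.length : Int) + 1 = ((res ++ [s[i]]).length : Int) := by simp
        rw [hprevn, ← e1, ← e2] at IH
        rw [altLoop, dif_pos hi, if_neg (by rw [hget]; exact hc), hget, ← IH]
        rw [hdrop, List.foldl_cons]
        by_cases hnl : s[i] = '\n'
        · have hstep : stepA (res, pmap, (i : Int), (res.length : Int), prevF s i) s[i]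
              = (res ++ [s[i]], pmap ++ [((res.length : Int), (i : Int))], (i : Int) + 1,
                 (res.length : Int) + 1, true) := by
            simp [stepA, h1, h2, hnl]
          rw [hstep]
          simp [hnl]
        · have hstep : stepA (res, pmap, (i : Int), (res.length : Int), prevF s i) s[i]
              = (res ++ [s[i]], pmap ++ [((res.length : Int), (i : Int))], (i : Int) + 1,
                 (res.length : Int) + 1, false) := by
            simp [stepA, h1, h2, hnl]
          rw [hstep]
          simp [hnl]
    · rw [List.drop_eq_nil_of_le (by omega), altLoop]
      simp [hi]
-- ===== VERDICT (by name: the statement is the Claim_ definition above) =====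
theorem remove_redundant_whitespace_py_spec : Claim_equal_remove_redundant_whitespace_py := by
  intro text _
  unfold Spec_remove_redundant_whitespace_py
  unfold remove_redundant_whitespace_py remove_redundant_whitespace_py_alt
  have h := mainLemma text.toList text.toList.length 0 [] [] (by omega)
    (by intro _ _; left; rfl)
  simp only [prevF] at h
  simp only [List.drop_zero, List.length_nil, Nat.cast_zero] at h
  simp only [ne_eq, not_true_eq_false, false_and, decide_false] at h
  rw [← h]
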